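-- pv_equiv track=rewrite | github.com/pchhonkar/Search-Engine-with-AutoCorrect-and-BPE | search_engine.py | build_vocab_indexes
-- ===== SOURCE A (Python) =====
-- from typing import List
-- from collections import defaultdict, Counter
--
-- def build_vocab_indexes(vocab: List[str]):
--     by_len = defaultdict(list)
--     by_first = defaultdict(list)
--     for w in vocab:
--         if not w:
--             continue
--         by_len[len(w)].append(w)
--         by_first[w[0]].append(w)
--     return by_len, by_first
-- ===== SOURCE B (Python) =====
-- from typing import List
-- from collections import defaultdict
--
--
-- def _group(words, key):
--     # words are all non-empty; keys in first-occurrence order, one filter pass per key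
--     d = defaultdict(list)
--     for k in dict.fromkeys(map(key, words)):
--         d[k] = [w for w in words if key(w) == k]
--     return d
--
--
-- def build_vocab_indexes(vocab: List[str]):
--     words = [w for w in vocab if w]
--     return _group(words, len), _group(words, lambda w: w[0])
-- ===== Notes on version B (the rewrite author's own statement) =====
-- stated objective: alternative
-- what changed: Instead of one pass appending each word into two defaultdicts, B filters out empty words once, dedups the key sequence (dict.fromkeys) and builds each group by a per-key filter pass, assigning whole lists at once.
import Mathlib
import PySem

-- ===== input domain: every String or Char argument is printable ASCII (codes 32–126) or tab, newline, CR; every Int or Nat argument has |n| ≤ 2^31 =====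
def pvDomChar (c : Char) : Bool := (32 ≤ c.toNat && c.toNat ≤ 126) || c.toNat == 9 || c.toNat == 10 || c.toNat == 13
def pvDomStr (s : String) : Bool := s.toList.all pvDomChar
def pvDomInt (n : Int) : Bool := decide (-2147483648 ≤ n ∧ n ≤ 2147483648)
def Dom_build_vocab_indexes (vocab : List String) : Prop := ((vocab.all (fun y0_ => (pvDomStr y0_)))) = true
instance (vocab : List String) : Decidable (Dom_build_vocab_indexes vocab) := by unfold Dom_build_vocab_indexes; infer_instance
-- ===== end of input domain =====

-- B groups the non-empty words by building the deduplicated key sequence first and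
-- taking one filter pass per distinct key, instead of A's single pass appending into
-- two defaultdicts (objective: alternative decomposition, same results).

-- ===== PORT A =====
-- w[0] as a 1-character string; the `""` default is unreachable: both ports only
-- apply pvFirst to words already checked non-empty (A's `if not w: continue` guard).
def pvFirst (w : String) : String :=
  ((PySem.Str.pyGet? w 0).map (fun c => String.ofList [c])).getD ""

def build_vocab_indexes (vocab : List String) : (List (Int × List String)) × (List (String × List String)) :=
  let p := vocab.foldl (fun st w =>
      if w = "" then st
      else (st.1.modify (PySem.Str.len w) [] (· ++ [w]),
            st.2.modify (pvFirst w) [] (· ++ [w])))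
    (PySem.Dict.empty, PySem.Dict.empty)
  (p.1.items, p.2.items)

-- ===== PORT B =====
-- dict.fromkeys over the key sequence (PySem.List.dedup), then d[k] = [w for w in words if key(w) == k]
def pvGroup {κ : Type} [BEq κ] (words : List String) (key : String → κ) : List (κ × List String) :=
  ((PySem.List.dedup (words.map key)).foldl
      (fun d k => d.insert k (words.filter (fun w => key w == k)))
      PySem.Dict.empty).items

def build_vocab_indexes_alt (vocab : List String) : (List (Int × List String)) × (List (String × List String)) :=
  let words := vocab.filter (fun w => !(w == ""))
  (pvGroup words (fun w => PySem.Str.len w), pvGroup words pvFirst)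

-- ===== PRECONDITION & SPEC =====
def Spec_build_vocab_indexes (vocab : List String) (out : (List (Int × List String)) × (List (String × List String))) : Prop := out = build_vocab_indexes_alt vocab
instance (vocab : List String) (out : (List (Int × List String)) × (List (String × List String))) : Decidable (Spec_build_vocab_indexes vocab out) := by unfold Spec_build_vocab_indexes; infer_instance

-- ===== CLAIM (what is proved, stated in full; the proofs are below) =====
def Claim_equal_build_vocab_indexes : Prop := ∀ (vocab : List String), Dom_build_vocab_indexes vocab → Spec_build_vocab_indexes vocab (build_vocab_indexes vocab)

-- ===== LEMMAS AND PROOFS =====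

-- A's `continue` on empty words = folding over the filtered list
theorem pv_foldl_guard {σ : Type} (g : σ → String → σ) :
    ∀ (vocab : List String) (st : σ),
      vocab.foldl (fun st w => if w = "" then st else g st w) st
        = (vocab.filter (fun w => !(w == ""))).foldl g st := by
  intro vocab
  induction vocab with
  | nil => intro st; rfl
  | cons w ws ih =>
    intro st
    by_cases h : w = "" <;> simp [h, ih]

-- a fold updating the two dict components independently = a pair of folds
theorem pv_foldl_pair :
    ∀ (ws : List String) (d1 : PySem.Dict Int (List String)) (d2 : PySem.Dict String (List String)),
      ws.foldl (fun st w => (st.1.modify (PySem.Str.len w) [] (· ++ [w]),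
                             st.2.modify (pvFirst w) [] (· ++ [w]))) (d1, d2)
        = (ws.foldl (fun d w => d.modify (PySem.Str.len w) [] (· ++ [w])) d1,
           ws.foldl (fun d w => d.modify (pvFirst w) [] (· ++ [w])) d2) := by
  intro ws
  induction ws with
  | nil => intro d1 d2; rfl
  | cons w t ih => intro d1 d2; simp only [List.foldl_cons]; exact ih _ _

-- the per-key characterisation: A's modify-append loop has exactly B's items
theorem pv_group_eq {κ : Type} [BEq κ] [LawfulBEq κ] (ws : List String) (key : String → κ) :
    (ws.foldl (fun d w => d.modify (key w) [] (· ++ [w])) PySem.Dict.empty).items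
      = pvGroup ws key := by
  have hnd : (ws.foldl (fun d w => d.modify (key w) [] (· ++ [w])) PySem.Dict.empty).keys.Nodup :=
    PySem.Dict.nodup_keys_foldl_modify_key ws key [] (fun _ w => (· ++ [w])) _
      PySem.Dict.nodup_keys_empty
  have hkeys : (ws.foldl (fun d w => d.modify (key w) [] (· ++ [w])) PySem.Dict.empty).keys
      = PySem.List.dedup (ws.map key) := by
    rw [PySem.Dict.keys_foldl_modify_key ws key [] (fun _ w => (· ++ [w]))]
    simp [PySem.Dict.keys_empty, PySem.Set.update_nil_left]
  have hgetD : ∀ k, (ws.foldl (fun d w => d.modify (key w) [] (· ++ [w]))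
        (PySem.Dict.empty : PySem.Dict κ (List String))).getD k []
      = ws.filter (fun w => key w == k) := by
    intro k
    have hmap : ws.foldl (fun d w => d.modify (key w) [] (· ++ [w]))
          (PySem.Dict.empty : PySem.Dict κ (List String))
        = (ws.map (fun w => (key w, w))).foldl
            (fun d p => d.modify p.1 [] (· ++ [p.2])) PySem.Dict.empty := by
      rw [List.foldl_map]
    rw [hmap, PySem.Dict.getD_foldl_modify_append]
    simp [List.filter_map, Function.comp_def, List.map_map]
  -- LHS as keys.map
  rw [PySem.Dict.items_eq_map_keys _ hnd []]
  rw [hkeys]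
  -- RHS: inserts over fresh distinct keys append
  have hfresh : ∀ a ∈ PySem.List.dedup (ws.map key),
      (PySem.Dict.empty : PySem.Dict κ (List String)).contains a = false := by
    intro a _; exact PySem.Dict.contains_empty a
  have hrhs : pvGroup ws key
      = (PySem.List.dedup (ws.map key)).map
          (fun k => (k, ws.filter (fun w => key w == k))) := by
    unfold pvGroup
    rw [PySem.Dict.items_foldl_insert_fresh (PySem.List.dedup (ws.map key)) (fun a => a)
          (fun k => ws.filter (fun w => key w == k)) PySem.Dict.empty hfresh
          (by simp)]
    simp [PySem.Dict.empty]
  rw [hrhs]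
  exact List.map_congr_left (fun k _ => by rw [hgetD k])

-- ===== VERDICT (by name: the statement is the Claim_ definition above) =====
theorem build_vocab_indexes_spec : Claim_equal_build_vocab_indexes := by
  intro vocab _
  simp only [Spec_build_vocab_indexes, build_vocab_indexes, build_vocab_indexes_alt]
  rw [pv_foldl_guard, pv_foldl_pair]
  rw [pv_group_eq (vocab.filter (fun w => !(w == ""))) (fun w => PySem.Str.len w),
      pv_group_eq (vocab.filter (fun w => !(w == ""))) pvFirst]
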